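-- pv_equiv track=rewrite | github.com/toemos/Google-Foobar | queue-to-do.py | solution
-- ===== SOURCE A (Python) =====
-- def solution(start, length):
--     checksum = 0
--     xorarray = []
--     for x in range(length):
--         linestartxor = xorrangefrom0(start + x * length - 1)
--         lineendxor = xorrangefrom0(start + x * length + length - 1 - x)
--         xorarray.append(linestartxor ^ lineendxor)
--     for i in xorarray:
--         checksum = checksum ^ i
--     return checksum
--
-- def xorrangefrom0(n):
--     if n % 4 == 0:
--         return n
--     if n % 4 == 1:
--         return 1
--     if n % 4 == 2:
--         return n + 1
--     if n % 4 == 3: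
--         return 0
-- ===== SOURCE B (Python) =====
-- def xor_interval(lo, hi):
--     # XOR of all integers in [lo, hi), hi > lo: peel the unpaired boundary
--     # elements, then each remaining pair (2k, 2k+1) XORs to 1, so only the
--     # parity of the pair count remains.
--     r = 0
--     if lo & 1:
--         r ^= lo
--         lo += 1
--     if hi & 1:
--         hi -= 1
--         r ^= hi
--     r ^= ((hi - lo) // 2) & 1
--     return r
--
-- def solution(start, length):
--     checksum = 0
--     for x in range(length):
--         lo = start + x * length
--         hi = lo + (length - x)
--         checksum ^= xor_interval(lo, hi)
--     return checksum
-- ===== Notes on version B (the rewrite author's own statement) =====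
-- stated objective: alternative
-- what changed: B drops the xorrangefrom0 prefix-XOR-from-0 helper (the n%4 case table) and the xorarray: each row's XOR is computed directly on its interval [lo,hi) by peeling the unpaired boundary elements and XORing in the parity of the count of (2k,2k+1) pairs, accumulated in one pass.
import Mathlib
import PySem

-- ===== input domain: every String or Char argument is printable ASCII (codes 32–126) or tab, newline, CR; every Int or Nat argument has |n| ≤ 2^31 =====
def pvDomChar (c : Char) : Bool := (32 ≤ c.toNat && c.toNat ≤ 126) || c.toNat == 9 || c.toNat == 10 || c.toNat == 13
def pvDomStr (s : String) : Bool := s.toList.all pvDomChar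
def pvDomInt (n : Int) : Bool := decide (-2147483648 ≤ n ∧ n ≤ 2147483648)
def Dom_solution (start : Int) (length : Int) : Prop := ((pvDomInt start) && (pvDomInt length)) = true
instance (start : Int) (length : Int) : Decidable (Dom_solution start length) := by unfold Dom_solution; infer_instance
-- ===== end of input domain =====

-- B drops the prefix-XOR-from-0 helper (the n%4 table) and the intermediate array: each row's
-- XOR is computed directly on its interval by boundary peeling + pair-count parity (alternative).

-- ===== PORT A =====
def xorrangefrom0 (n : Int) : Int :=
  if PySem.Int.mod n 4 = 0 then n
  else if PySem.Int.mod n 4 = 1 then 1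
  else if PySem.Int.mod n 4 = 2 then n + 1
  else 0  -- the n % 4 == 3 branch; n % 4 ∈ {0,1,2,3} so Python's implicit fall-through is unreachable

def solution (start : Int) (length : Int) : Int :=
  let xorarray : List Int :=
    (PySem.List.pyRange 0 length 1).foldl
      (fun arr x =>
        arr ++ [PySem.Int.bxor (xorrangefrom0 (start + x * length - 1))
                               (xorrangefrom0 (start + x * length + length - 1 - x))]) []
  xorarray.foldl (fun checksum i => PySem.Int.bxor checksum i) 0

-- ===== PORT B =====
-- B's helper: XOR of the integers in [lo, hi) by peeling the unpaired boundary elements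
-- and XORing in the pair-count parity ('if lo & 1:' is Python truthiness: lo & 1 ≠ 0)
def xorInterval (lo : Int) (hi : Int) : Int :=
  let r : Int := 0
  let (r, lo) := if PySem.Int.band lo 1 ≠ 0 then (PySem.Int.bxor r lo, lo + 1) else (r, lo)
  let (r, hi) := if PySem.Int.band hi 1 ≠ 0 then (PySem.Int.bxor r (hi - 1), hi - 1) else (r, hi)
  PySem.Int.bxor r (PySem.Int.band (PySem.Int.floordiv (hi - lo) 2) 1)

def solution_alt (start : Int) (length : Int) : Int :=
  (PySem.List.pyRange 0 length 1).foldl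
    (fun checksum x =>
      let lo := start + x * length
      let hi := lo + (length - x)
      PySem.Int.bxor checksum (xorInterval lo hi)) 0

-- ===== PRECONDITION & SPEC =====
def Spec_solution (start : Int) (length : Int) (out : Int) : Prop := out = solution_alt start length
instance (start : Int) (length : Int) (out : Int) : Decidable (Spec_solution start length out) := by unfold Spec_solution; infer_instance

-- ===== CLAIM (what is proved, stated in full; the proofs are below) =====
def Claim_equal_solution : Prop := ∀ (start : Int) (length : Int), Dom_solution start length → Spec_solution start length (solution start length)

-- ===== LEMMAS AND PROOFS =====

theorem zero_bxor (a : Int) : PySem.Int.bxor 0 a = a := by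
  rw [PySem.Int.bxor_comm, PySem.Int.bxor_zero]

theorem bxor_eq_xor (a b : Int) : PySem.Int.bxor a b = Int.xor a b := by
  rcases a with m | m <;> rcases b with n | n <;>
    simp [PySem.Int.bxor, Int.xor, Int.negSucc_eq] <;> omega

theorem bxor_assoc (a b c : Int) :
    PySem.Int.bxor (PySem.Int.bxor a b) c = PySem.Int.bxor a (PySem.Int.bxor b c) := by
  simp only [bxor_eq_xor]
  rcases a with m | m <;> rcases b with n | n <;> rcases c with k | k <;>
    simp [Int.xor, Nat.xor_assoc]

-- Nat bit facts used by the even/odd XOR lemmas below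
theorem nat_two_mul_xor_one (j : Nat) : (2*j) ^^^ 1 = 2*j+1 := by
  have := Nat.bitwise_bit (f := bne) (a := false) (m := j) (b := true) (n := 0)
  simp [Nat.bit] at this
  simpa [HXor.hXor, XorOp.xor, Nat.xor] using this

theorem nat_odd_xor_one (j : Nat) : (2*j+1) ^^^ 1 = 2*j := by
  have := Nat.bitwise_bit (f := bne) (a := true) (m := j) (b := true) (n := 0)
  simp [Nat.bit] at this
  simpa [HXor.hXor, XorOp.xor, Nat.xor] using this

theorem nat_xor_succ_self (j : Nat) : (2*j) ^^^ (2*j+1) = 1 := by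
  have := Nat.bitwise_bit (f := bne) (a := false) (m := j) (b := true) (n := j)
  simp [Nat.bit] at this
  have hs : Nat.bitwise bne j j = 0 := by
    have h0 : j ^^^ j = 0 := Nat.xor_self j
    simpa [HXor.hXor, XorOp.xor, Nat.xor] using h0
  simpa [HXor.hXor, XorOp.xor, Nat.xor, hs] using this

theorem nat_odd_xor_pred (j : Nat) : (2*j+1) ^^^ (2*j) = 1 := by
  rw [Nat.xor_comm]; exact nat_xor_succ_self j

-- Int XOR of an even number with 1 appends the low bit
theorem bxor_even_one (e : Int) (h : e % 2 = 0) : PySem.Int.bxor e 1 = e + 1 := by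
  rw [bxor_eq_xor]
  rcases e with k | k
  · obtain ⟨j, hj⟩ : ∃ j, k = 2*j := ⟨k/2, by simp only [Int.ofNat_eq_natCast] at h; omega⟩
    subst hj
    show Int.ofNat ((2*j) ^^^ 1) = _
    rw [nat_two_mul_xor_one]; simp
  · rw [Int.negSucc_eq] at h
    obtain ⟨j, hj⟩ : ∃ j, k = 2*j+1 := ⟨k/2, by omega⟩
    subst hj
    show Int.negSucc ((2*j+1) ^^^ 1) = _
    rw [nat_odd_xor_one, Int.negSucc_eq, Int.negSucc_eq]; push_cast; ring

-- Int XOR of an even number with its successor is 1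
theorem bxor_even_succ (e : Int) (h : e % 2 = 0) : PySem.Int.bxor e (e + 1) = 1 := by
  rw [bxor_eq_xor]
  rcases e with k | k
  · obtain ⟨j, hj⟩ : ∃ j, k = 2*j := ⟨k/2, by simp only [Int.ofNat_eq_natCast] at h; omega⟩
    subst hj
    show Int.xor (Int.ofNat (2*j)) (Int.ofNat (2*j) + 1) = 1
    have : (Int.ofNat (2*j) : Int) + 1 = Int.ofNat (2*j+1) := by simp
    rw [this]
    show Int.ofNat ((2*j) ^^^ (2*j+1)) = 1
    rw [nat_xor_succ_self]; rfl
  · rw [Int.negSucc_eq] at h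
    obtain ⟨j, hj⟩ : ∃ j, k = 2*j+1 := ⟨k/2, by omega⟩
    subst hj
    have : (Int.negSucc (2*j+1) : Int) + 1 = Int.negSucc (2*j) := by
      rw [Int.negSucc_eq, Int.negSucc_eq]; push_cast; ring
    rw [this]
    show Int.ofNat ((2*j+1) ^^^ (2*j)) = 1
    rw [nat_odd_xor_pred]; rfl

-- PySem.Int.mod with a positive literal divisor is Lean's emod
theorem pymod4 (n : Int) : PySem.Int.mod n 4 = n % 4 := by
  simp [PySem.Int.mod]; rw [Int.fmod_eq_emod]; simp

theorem pymod2 (n : Int) : PySem.Int.mod n 2 = n % 2 := by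
  simp [PySem.Int.mod]; rw [Int.fmod_eq_emod]; simp

-- n & 1 is the low bit
theorem band_one_emod (n : Int) : PySem.Int.band n 1 = n % 2 := by
  rw [PySem.Int.band_one, pymod2]

-- THE key step: A's helper is a prefix-XOR boundary: g(m-1) ^ m = g(m) for every Int m
theorem xorrangefrom0_step (m : Int) :
    PySem.Int.bxor (xorrangefrom0 (m - 1)) m = xorrangefrom0 m := by
  unfold xorrangefrom0
  rw [pymod4, pymod4]
  have h4 : m % 4 = 0 ∨ m % 4 = 1 ∨ m % 4 = 2 ∨ m % 4 = 3 := by omega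
  rcases h4 with h | h | h | h
  · have h' : (m - 1) % 4 = 3 := by omega
    rw [h, h']; norm_num [zero_bxor]
  · have h' : (m - 1) % 4 = 0 := by omega
    rw [h, h']; norm_num
    have he : (m - 1) % 2 = 0 := by omega
    have := bxor_even_succ (m - 1) he
    simpa using this
  · have h' : (m - 1) % 4 = 1 := by omega
    rw [h, h']; norm_num
    have he : m % 2 = 0 := by omega
    rw [PySem.Int.bxor_comm]
    exact bxor_even_one m he
  · have h' : (m - 1) % 4 = 2 := by omega
    rw [h, h']; norm_num

-- XOR-fold of f over a list (the shape both ports' loops reduce to)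
def bX (f : Int → Int) (l : List Int) : Int :=
  l.foldl (fun c x => PySem.Int.bxor c (f x)) 0

theorem bX_append_singleton (f : Int → Int) (l : List Int) (c : Int) :
    bX f (l ++ [c]) = PySem.Int.bxor (bX f l) (f c) := by
  unfold bX
  rw [List.foldl_append]
  simp only [List.foldl_cons, List.foldl_nil]

theorem bX_congr (f h : Int → Int) (l : List Int) (he : ∀ x ∈ l, f x = h x) :
    bX f l = bX h l := by
  unfold bX
  apply PySem.List.foldl_congr_mem
  intro acc x hx
  rw [he x hx]

-- A's per-row closed form via the step lemma: XOR of a, a+1, …, a+n-1 as two g-boundaries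
theorem rowsum (a : Int) (n : Nat) :
    bX (fun j => a + j) (PySem.List.pyRange 0 (n : Int) 1)
      = PySem.Int.bxor (xorrangefrom0 (a - 1)) (xorrangefrom0 (a + n - 1)) := by
  induction n with
  | zero => simp [PySem.List.pyRange_one_eq_nil, bX, PySem.Int.bxor_self]
  | succ n ih =>
      have hcast : ((n + 1 : Nat) : Int) = (n : Int) + 1 := by push_cast; ring
      rw [hcast, PySem.List.pyRange_one_succ_right (by positivity), bX_append_singleton, ih]
      rw [bxor_assoc]
      have h1 : a + ((n : Int) + 1) - 1 = a + n := by ring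
      have h2 : a + (n : Int) - 1 = (a + n) - 1 := by ring
      rw [h1, h2, xorrangefrom0_step (a + n)]

-- B's interval helper on a single element
theorem xorInterval_base (a : Int) : xorInterval a (a + 1) = a := by
  unfold xorInterval
  have hb0 : PySem.Int.band (0:Int) 1 = 0 := by decide
  rcases Int.even_or_odd a with ⟨q, hq⟩ | ⟨q, hq⟩
  · have h1 : PySem.Int.band a 1 = 0 := by rw [band_one_emod]; omega
    have h2 : PySem.Int.band (a + 1) 1 = 1 := by rw [band_one_emod]; omega
    simp only [h1, h2]
    norm_num
    rw [hb0, PySem.Int.bxor_zero, zero_bxor]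
  · have h1 : PySem.Int.band a 1 = 1 := by rw [band_one_emod]; omega
    have h2 : PySem.Int.band (a + 1) 1 = 0 := by rw [band_one_emod]; omega
    simp only [h1, h2]
    norm_num
    rw [hb0, PySem.Int.bxor_zero, zero_bxor]

-- rotate the last two XOR operands
theorem bxor_rot (c t b : Int) :
    PySem.Int.bxor (PySem.Int.bxor c t) b = PySem.Int.bxor (PySem.Int.bxor c b) t := by
  rw [bxor_assoc, PySem.Int.bxor_comm t b, ← bxor_assoc]

-- B's interval helper absorbs the next element on the right
theorem xorInterval_step (a b : Int) (_hab : a < b) :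
    xorInterval a (b + 1) = PySem.Int.bxor (xorInterval a b) b := by
  unfold xorInterval
  rcases Int.even_or_odd b with ⟨q, hq⟩ | ⟨q, hq⟩
  · -- b even, b+1 odd: the (b+1)-interval peels b at the top, pairs unchanged
    have hb : PySem.Int.band b 1 = 0 := by rw [band_one_emod]; omega
    have hb1 : PySem.Int.band (b + 1) 1 = 1 := by rw [band_one_emod]; omega
    simp only [hb, hb1]
    norm_num
    rcases Int.even_or_odd a with ⟨p, hp⟩ | ⟨p, hp⟩
    · have ha : PySem.Int.band a 1 = 0 := by rw [band_one_emod]; omega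
      simp only [ha]; norm_num
      rw [zero_bxor, zero_bxor]
      exact PySem.Int.bxor_comm b _
    · have ha : PySem.Int.band a 1 = 1 := by rw [band_one_emod]; omega
      simp only [ha]; norm_num
      exact (bxor_rot _ _ b).symm
  · -- b odd, b+1 even: one more full pair, no top peel
    have hb : PySem.Int.band b 1 = 1 := by rw [band_one_emod]; omega
    have hb1 : PySem.Int.band (b + 1) 1 = 0 := by rw [band_one_emod]; omega
    simp only [hb, hb1]
    norm_num
    have hbe : (b - 1) % 2 = 0 := by omega
    have hstep := bxor_even_succ (b - 1) hbe
    rw [show b - 1 + 1 = b by ring] at hstep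
    rcases Int.even_or_odd a with ⟨p, hp⟩ | ⟨p, hp⟩
    · have ha : PySem.Int.band a 1 = 0 := by rw [band_one_emod]; omega
      simp only [ha]; norm_num
      obtain ⟨m, hm⟩ : ∃ m, b - 1 - a = 2 * m := ⟨(b-1-a)/2, by omega⟩
      have d1 : (b + 1 - a) / 2 = m + 1 := by omega
      have d2 : (b - 1 - a) / 2 = m := by omega
      rw [d1, d2, band_one_emod, band_one_emod, zero_bxor, zero_bxor]
      rw [bxor_rot (b - 1) (m % 2) b, hstep]
      rcases Int.even_or_odd m with ⟨t, ht⟩ | ⟨t, ht⟩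
      · rw [show m % 2 = 0 by omega, show (m + 1) % 2 = 1 by omega]; decide
      · rw [show m % 2 = 1 by omega, show (m + 1) % 2 = 0 by omega]; decide
    · have ha : PySem.Int.band a 1 = 1 := by rw [band_one_emod]; omega
      simp only [ha]; norm_num
      obtain ⟨m, hm⟩ : ∃ m, b - 1 - (a + 1) = 2 * m := ⟨(b-1-(a+1))/2, by omega⟩
      have d1 : (b - a) / 2 = m + 1 := by omega
      have d2 : (b - 1 - (a + 1)) / 2 = m := by omega
      rw [d1, d2, band_one_emod, band_one_emod, zero_bxor]
      rw [bxor_rot (PySem.Int.bxor a (b - 1)) (m % 2) b, bxor_assoc a (b - 1) b, hstep]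
      rw [bxor_assoc a 1 (m % 2)]
      congr 1
      rcases Int.even_or_odd m with ⟨t, ht⟩ | ⟨t, ht⟩
      · rw [show m % 2 = 0 by omega, show (m + 1) % 2 = 1 by omega]; decide
      · rw [show m % 2 = 1 by omega, show (m + 1) % 2 = 0 by omega]; decide

-- B's interval helper computes the XOR-fold over the interval's elements
theorem xorInterval_row (a : Int) (n : Nat) :
    xorInterval a (a + ((n : Int) + 1))
      = bX (fun j => a + j) (PySem.List.pyRange 0 ((n : Int) + 1) 1) := by
  induction n with
  | zero =>
      rw [show a + (((0:Nat) : Int) + 1) = a + 1 by norm_num, xorInterval_base]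
      rw [show (((0:Nat) : Int) + 1) = 1 by norm_num,
          PySem.List.pyRange_one_cons (by norm_num : (0:Int) < 1)]
      norm_num [PySem.List.pyRange_one_eq_nil, bX, zero_bxor]
  | succ n ih =>
      have hc : ((n + 1 : Nat) : Int) = (n : Int) + 1 := by push_cast; ring
      rw [hc]
      have hlt : a < a + ((n : Int) + 1) := by omega
      rw [show a + ((n : Int) + 1 + 1) = (a + ((n : Int) + 1)) + 1 by ring,
          xorInterval_step a _ hlt, ih,
          show (n : Int) + 1 + 1 = ((n : Int) + 1) + 1 by ring]
      conv_rhs => rw [PySem.List.pyRange_one_succ_right (by positivity : (0:Int) ≤ (n:Int) + 1),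
                      bX_append_singleton]

theorem append_fold_eq_map (l : List Int) (f : Int → Int) :
    l.foldl (fun arr x => arr ++ [f x]) [] = l.map f := by
  have h : ∀ (l : List Int) (init : List Int),
      l.foldl (fun arr x => arr ++ [f x]) init = init ++ l.map f := by
    intro l
    induction l with
    | nil => simp
    | cons a l ih => intro init; simp [ih]
  simpa using h l []

theorem solution_spec : Claim_equal_solution := by
  unfold Claim_equal_solution
  intro start length _
  unfold Spec_solution solution solution_alt
  rw [append_fold_eq_map, List.foldl_map]
  show bX (fun x => PySem.Int.bxor (xorrangefrom0 (start + x * length - 1))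
            (xorrangefrom0 (start + x * length + length - 1 - x)))
        (PySem.List.pyRange 0 length 1) = _
  show _ = bX (fun x => xorInterval (start + x * length) (start + x * length + (length - x)))
      (PySem.List.pyRange 0 length 1)
  apply bX_congr
  intro x hx
  obtain ⟨hx0, hxl⟩ := (PySem.List.mem_pyRange_one).mp hx
  -- the row has length - x ≥ 1 elements; write it as n + 1
  have hn : (((length - x - 1).toNat : Nat) : Int) + 1 = length - x := by omega
  -- A's term via rowsum, B's term via xorInterval_row, both equal the bX over the row
  have hA := rowsum (start + x * length) (length - x).toNat
  have hnA : (((length - x).toNat : Nat) : Int) = length - x := by omega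
  rw [hnA] at hA
  have hB := xorInterval_row (start + x * length) (length - x - 1).toNat
  rw [hn] at hB
  rw [hB, hA]
  have harg : start + x * length + (length - x) - 1 = start + x * length + length - 1 - x := by
    ring
  rw [harg]
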